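-- pv_equiv track=rewrite | github.com/ray-bao-mcgill/yt_transcript | transformer_app/bert_word_clustering_analyzer.py | _analyze_bias_indicators
-- ===== SOURCE A (Python) =====
-- from typing import Dict, List, Tuple, Optional
--
-- def _analyze_bias_indicators(words: List[str]) -> Dict:
--     """Analyze bias indicators in words"""
--     bias_indicators = {
--         'loaded_language': 0,
--         'emotional_words': 0,
--         'subjective_terms': 0
--     }
--
--     loaded_words = ['radical', 'extreme', 'dangerous', 'corrupt', 'evil', 'amazing', 'terrible', 'horrible', 'wonderful']
--     emotional_words = ['love', 'hate', 'fear', 'anger', 'joy', 'sadness', 'hope', 'despair']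
--     subjective_terms = ['obviously', 'clearly', 'undoubtedly', 'certainly', 'definitely', 'absolutely']
--
--     for word in words:
--         if word in loaded_words:
--             bias_indicators['loaded_language'] += 1
--         if word in emotional_words:
--             bias_indicators['emotional_words'] += 1
--         if word in subjective_terms:
--             bias_indicators['subjective_terms'] += 1
--
--     return bias_indicators
-- ===== SOURCE B (Python) =====
-- from typing import Dict, List
--
--
-- def _analyze_bias_indicators(words: List[str]) -> Dict:
--     """Analyze bias indicators: index the words once, then scan the fixed vocabularies."""
--     loaded_words = ['radical', 'extreme', 'dangerous', 'corrupt', 'evil', 'amazing', 'terrible', 'horrible', 'wonderful']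
--     emotional_words = ['love', 'hate', 'fear', 'anger', 'joy', 'sadness', 'hope', 'despair']
--     subjective_terms = ['obviously', 'clearly', 'undoubtedly', 'certainly', 'definitely', 'absolutely']
--
--     freq = {}
--     for w in words:
--         freq[w] = freq.get(w, 0) + 1
--
--     return {
--         'loaded_language': sum(freq.get(w, 0) for w in loaded_words),
--         'emotional_words': sum(freq.get(w, 0) for w in emotional_words),
--         'subjective_terms': sum(freq.get(w, 0) for w in subjective_terms),
--     }
-- ===== Notes on version B (the rewrite author's own statement) =====
-- stated objective: faster
-- what changed: B builds one frequency dict of the input words and then computes each category count by summing the table over the three fixed vocabulary lists, instead of A's per-word loop performing three list membership tests and incrementing counters.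
import Mathlib
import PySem

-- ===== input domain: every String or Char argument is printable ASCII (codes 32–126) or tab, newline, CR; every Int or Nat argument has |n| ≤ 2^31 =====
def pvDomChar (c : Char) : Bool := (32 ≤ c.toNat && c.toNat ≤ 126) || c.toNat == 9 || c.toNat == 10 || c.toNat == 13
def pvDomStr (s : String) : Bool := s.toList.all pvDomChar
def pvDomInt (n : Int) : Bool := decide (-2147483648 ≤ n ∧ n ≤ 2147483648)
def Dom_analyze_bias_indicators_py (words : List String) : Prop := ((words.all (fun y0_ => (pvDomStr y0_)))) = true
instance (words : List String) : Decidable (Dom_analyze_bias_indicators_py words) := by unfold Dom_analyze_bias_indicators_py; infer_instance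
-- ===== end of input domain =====

-- B replaces A's per-word triple membership loop by one frequency table queried per vocabulary word (objective: alternative).

-- the three fixed vocabulary lists (identical literals in A and B)
def pvLoadedWords : List String := ["radical", "extreme", "dangerous", "corrupt", "evil", "amazing", "terrible", "horrible", "wonderful"]
def pvEmotionalWords : List String := ["love", "hate", "fear", "anger", "joy", "sadness", "hope", "despair"]
def pvSubjectiveTerms : List String := ["obviously", "clearly", "undoubtedly", "certainly", "definitely", "absolutely"]

-- ===== PORT A =====
-- A's loop body: three independent membership tests, each incrementing its counter in the dict
def pvStepA (d : PySem.Dict String Int) (word : String) : PySem.Dict String Int :=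
  let d := if pvLoadedWords.contains word then d.insert "loaded_language" (d.getD "loaded_language" 0 + 1) else d
  let d := if pvEmotionalWords.contains word then d.insert "emotional_words" (d.getD "emotional_words" 0 + 1) else d
  if pvSubjectiveTerms.contains word then d.insert "subjective_terms" (d.getD "subjective_terms" 0 + 1) else d

def analyze_bias_indicators_py (words : List String) : List (String × Int) :=
  (words.foldl pvStepA
    (((PySem.Dict.empty.insert "loaded_language" 0).insert "emotional_words" 0).insert "subjective_terms" 0)).items

-- ===== PORT B =====
-- B's frequency table of the input words (freq[w] = freq.get(w, 0) + 1 loop)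
def pvFreq (words : List String) : PySem.Dict String Int :=
  words.foldl (fun d w => d.insert w (d.getD w 0 + 1)) PySem.Dict.empty

def analyze_bias_indicators_py_alt (words : List String) : List (String × Int) :=
  [("loaded_language", (pvLoadedWords.map (fun w => (pvFreq words).getD w 0)).sum),
   ("emotional_words", (pvEmotionalWords.map (fun w => (pvFreq words).getD w 0)).sum),
   ("subjective_terms", (pvSubjectiveTerms.map (fun w => (pvFreq words).getD w 0)).sum)]

-- ===== PRECONDITION & SPEC =====
def Spec_analyze_bias_indicators_py (words : List String) (out : List (String × Int)) : Prop := out = analyze_bias_indicators_py_alt words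
instance (words : List String) (out : List (String × Int)) : Decidable (Spec_analyze_bias_indicators_py words out) := by unfold Spec_analyze_bias_indicators_py; infer_instance

-- ===== CLAIM (what is proved, stated in full; the proofs are below) =====
def Claim_equal_analyze_bias_indicators_py : Prop := ∀ (words : List String), Dom_analyze_bias_indicators_py words → Spec_analyze_bias_indicators_py words (analyze_bias_indicators_py words)

-- ===== LEMMAS AND PROOFS =====

-- a word absent from a vocabulary contributes 0 to the indicator sum
theorem pv_sum_indicator_zero (x : String) (vs : List String) (h : x ∉ vs) :
    (vs.map (fun w => if x == w then (1 : Int) else 0)).sum = 0 := by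
  induction vs with
  | nil => simp
  | cons v t ih =>
    have h1 : x ≠ v := fun hxv => h (hxv ▸ List.mem_cons_self)
    have h2 : x ∉ t := fun hxt => h (List.mem_cons_of_mem v hxt)
    rw [List.map_cons, List.sum_cons, ih h2]
    simp [h1]

-- indicator sum over a duplicate-free vocabulary
theorem pv_sum_indicator (x : String) (vocab : List String) (h : vocab.Nodup) :
    (vocab.map (fun w => if x == w then (1 : Int) else 0)).sum
      = if vocab.contains x then 1 else 0 := by
  induction vocab with
  | nil => simp
  | cons v vs ih =>
    rcases List.nodup_cons.mp h with ⟨hv, hvs⟩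
    simp only [List.map_cons, List.sum_cons, List.contains_cons]
    by_cases hx : x = v
    · subst hx
      rw [pv_sum_indicator_zero x vs hv]
      simp
    · rw [ih hvs]
      by_cases hm : x ∈ vs <;> simp [hx, hm]

-- sum of per-vocabulary-word counts = one countP over the words
theorem pv_sum_count (vocab : List String) (h : vocab.Nodup) (ws : List String) :
    (vocab.map (fun w => ((ws.count w : Nat) : Int))).sum
      = ((ws.countP (fun x => vocab.contains x) : Nat) : Int) := by
  induction ws with
  | nil => simp
  | cons x t ih =>
    have hsplit : (vocab.map (fun w => (((x :: t).count w : Nat) : Int)))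
        = vocab.map (fun w => ((t.count w : Nat) : Int) + (if x == w then (1 : Int) else 0)) := by
      refine List.map_congr_left (fun w _ => ?_)
      rw [List.count_cons]
      split_ifs <;> push_cast <;> ring
    rw [hsplit, List.sum_map_add, ih, pv_sum_indicator x vocab h, List.countP_cons]
    by_cases hx : vocab.contains x = true <;> simp [hx]

-- one step of A's loop on the three-counter dict
theorem pv_stepA_eq (x : String) (a b c : Int) :
    pvStepA (PySem.Dict.mk [("loaded_language", a), ("emotional_words", b), ("subjective_terms", c)]) x
      = PySem.Dict.mk [("loaded_language", a + (if pvLoadedWords.contains x then (1 : Int) else 0)),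
                       ("emotional_words", b + (if pvEmotionalWords.contains x then (1 : Int) else 0)),
                       ("subjective_terms", c + (if pvSubjectiveTerms.contains x then (1 : Int) else 0))] := by
  unfold pvStepA
  split_ifs <;> simp [PySem.Dict.insert, PySem.Dict.getD, PySem.Dict.get?]

-- characterisation of A's fold: the three counters accumulate countP over the suffix
theorem pv_foldA (ws : List String) (a b c : Int) :
    ws.foldl pvStepA (PySem.Dict.mk [("loaded_language", a), ("emotional_words", b), ("subjective_terms", c)])
    = PySem.Dict.mk [("loaded_language", a + ((ws.countP (fun x => pvLoadedWords.contains x) : Nat) : Int)),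
                     ("emotional_words", b + ((ws.countP (fun x => pvEmotionalWords.contains x) : Nat) : Int)),
                     ("subjective_terms", c + ((ws.countP (fun x => pvSubjectiveTerms.contains x) : Nat) : Int))] := by
  induction ws generalizing a b c with
  | nil => simp
  | cons x t ih =>
    rw [List.foldl_cons, pv_stepA_eq, ih]
    simp only [List.countP_cons, PySem.Dict.mk.injEq, List.cons.injEq, Prod.mk.injEq,
      true_and, and_true]
    refine ⟨?_, ?_, ?_⟩ <;> (split_ifs with h <;> simp [h] <;> omega)

-- ===== VERDICT (by name: the statement is the Claim_ definition above) =====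
theorem analyze_bias_indicators_py_spec : Claim_equal_analyze_bias_indicators_py := by
  intro words _
  unfold Spec_analyze_bias_indicators_py analyze_bias_indicators_py analyze_bias_indicators_py_alt
  have hinit : ((PySem.Dict.empty.insert "loaded_language" (0:Int)).insert "emotional_words" 0).insert "subjective_terms" 0
      = PySem.Dict.mk [("loaded_language", 0), ("emotional_words", 0), ("subjective_terms", 0)] := by decide
  rw [hinit, pv_foldA]
  have hfreq : pvFreq words = PySem.Dict.counter words := by
    unfold pvFreq
    exact PySem.Dict.foldl_insert_getD_add_one_eq_counter words
  have hgd : ∀ (vocab : List String),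
      (vocab.map (fun w => (pvFreq words).getD w 0)).sum
        = (vocab.map (fun w => ((words.count w : Nat) : Int))).sum := by
    intro vocab
    refine congrArg List.sum (List.map_congr_left (fun w _ => ?_))
    rw [hfreq]
    exact PySem.Dict.getD_counter words w
  rw [hgd, hgd, hgd,
      pv_sum_count pvLoadedWords (by decide) words,
      pv_sum_count pvEmotionalWords (by decide) words,
      pv_sum_count pvSubjectiveTerms (by decide) words]
  simp
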